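-- pv_equiv track=rewrite | github.com/domagoj-bosnjak/Divide_and_conquer_ML | src/data_reduction.py | data_reduction
-- ===== SOURCE A (Python) =====
-- def data_reduction(images, clustering_labels):
--     """
--     Function that reduces the amount of images in a *specific* class
--         (all input images belong to the same class)
--
--     :param images               : list of images in class
--     :param clustering_labels    : labels as per clustering
--
--     :return: indices_to_save    : indices of images that remaing after clustering
--     """
--     labels_set = set(clustering_labels)
--     labels_set.remove(-1)
--
--     indices_to_save = []
--
--     for i in range(len(images)):
--         cluster_label = clustering_labels[i]
--
--         if cluster_label in labels_set and cluster_label != -1:  # if it is not a noise point and not yet chosen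
--             indices_to_save.append(i)
--
--             labels_set.remove(cluster_label)
--
--         if cluster_label == -1:     # save noise points
--             indices_to_save.append(i)
--
--     return indices_to_save
-- ===== SOURCE B (Python) =====
-- def data_reduction(images, clustering_labels):
--     # Different decomposition: build the surviving index set declaratively --
--     # all noise indices plus, per cluster label, its first occurrence -- and
--     # sort, instead of A's single pass with a mutable shrinking label set.
--     labels_set = set(clustering_labels)
--     labels_set.remove(-1)
--     noise_indices = [i for i in range(len(images))
--                      if clustering_labels[i] == -1]
--     cluster_first_indices = []
--     for label in labels_set:
--         first = next((i for i in range(len(images))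
--                       if clustering_labels[i] == label), None)
--         if first is not None:
--             cluster_first_indices.append(first)
--     return sorted(noise_indices + cluster_first_indices)
-- ===== Notes on version B (the rewrite author's own statement) =====
-- stated objective: alternative
-- what changed: Instead of A's single pass that mutates a shrinking label set and appends chosen/noise indices in order, B builds the noise indices and each cluster label's first-occurrence index independently and returns their sorted union.
import Mathlib
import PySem

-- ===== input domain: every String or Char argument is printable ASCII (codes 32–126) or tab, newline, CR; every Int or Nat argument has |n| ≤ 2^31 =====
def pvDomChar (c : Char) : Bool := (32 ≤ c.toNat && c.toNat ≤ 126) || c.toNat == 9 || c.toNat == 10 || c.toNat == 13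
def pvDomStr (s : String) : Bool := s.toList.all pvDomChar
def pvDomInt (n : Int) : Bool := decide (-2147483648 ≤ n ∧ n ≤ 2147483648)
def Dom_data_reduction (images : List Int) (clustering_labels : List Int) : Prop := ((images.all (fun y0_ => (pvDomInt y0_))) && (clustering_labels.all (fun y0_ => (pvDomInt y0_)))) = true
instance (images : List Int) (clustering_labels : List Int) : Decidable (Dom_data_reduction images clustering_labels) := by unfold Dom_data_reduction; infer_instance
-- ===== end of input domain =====

-- B rebuilds the result as sorted(noise indices + first index per cluster label) instead of A's one-pass mutable shrinking label set (alternative decomposition; not faster).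

-- ===== PORT A =====
def data_reduction (images : List Int) (clustering_labels : List Int) : List Int :=
  -- labels_set = set(clustering_labels); labels_set.remove(-1)  (none = KeyError, excluded by Pre_)
  let labels_set := ((PySem.Set.ofList clustering_labels).remove? (-1)).getD []
  ((PySem.List.pyRange 0 (images.length : Int) 1).foldl
    (fun (st : PySem.Set Int × List Int) i =>
      -- cluster_label = clustering_labels[i]  (in range by Pre_)
      let cluster_label := PySem.List.pyGetD clustering_labels i 0
      let st1 := if st.1.contains cluster_label && cluster_label != -1
        then (((st.1.remove? cluster_label).getD st.1), st.2 ++ [i])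
        else st
      if cluster_label == -1 then (st1.1, st1.2 ++ [i]) else st1)
    (labels_set, ([] : List Int))).2

-- ===== PORT B =====
def data_reduction_alt (images : List Int) (clustering_labels : List Int) : List Int :=
  -- labels_set = set(clustering_labels); labels_set.remove(-1)  (none = KeyError, excluded by Pre_)
  let labels_set := ((PySem.Set.ofList clustering_labels).remove? (-1)).getD []
  let noise_indices := (PySem.List.pyRange 0 (images.length : Int) 1).filter
      (fun i => PySem.List.pyGetD clustering_labels i 0 == -1)
  -- the for-loop appending each non-None first occurrence = filterMap over the set
  -- (the sorted return value does not depend on the set's iteration order)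
  let cluster_first_indices := labels_set.filterMap
      (fun label => (PySem.List.pyRange 0 (images.length : Int) 1).find?
        (fun i => PySem.List.pyGetD clustering_labels i 0 == label))
  PySem.List.sorted (noise_indices ++ cluster_first_indices) (fun x => x) false

-- ===== PRECONDITION & SPEC =====
-- Pre_ excludes exactly the inputs where Python A raises: KeyError when -1 is absent
-- from clustering_labels, IndexError when clustering_labels is shorter than images.
def Pre_data_reduction (images : List Int) (clustering_labels : List Int) : Prop :=
  (-1 : Int) ∈ clustering_labels ∧ images.length ≤ clustering_labels.length
instance (images : List Int) (clustering_labels : List Int) : Decidable (Pre_data_reduction images clustering_labels) := by unfold Pre_data_reduction; infer_instance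
def pvWitness_data_reduction : List Int × List Int := ([10, 20, 30], [0, -1, 0])

def Spec_data_reduction (images : List Int) (clustering_labels : List Int) (out : List Int) : Prop := out = data_reduction_alt images clustering_labels
instance (images : List Int) (clustering_labels : List Int) (out : List Int) : Decidable (Spec_data_reduction images clustering_labels out) := by unfold Spec_data_reduction; infer_instance

-- ===== CLAIM (what is proved, stated in full; the proofs are below) =====
def Claim_equal_data_reduction : Prop := ∀ (images : List Int) (clustering_labels : List Int), Dom_data_reduction images clustering_labels → Pre_data_reduction images clustering_labels → Spec_data_reduction images clustering_labels (data_reduction images clustering_labels)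

-- ===== LEMMAS AND PROOFS =====

-- x ∈ L.take (k+1) ↔ x ∈ L.take k ∨ x = L[k]
lemma mem_take_succ (L : List Int) (k : Nat) (hk : k < L.length) (x : Int) :
    x ∈ L.take (k + 1) ↔ x ∈ L.take k ∨ x = L[k] := by
  rw [List.take_add_one, List.getElem?_eq_getElem hk]
  simp only [Option.toList_some, List.mem_append, List.mem_singleton]

-- Loop invariant: after processing indices 0..k-1, A's accumulator equals B's filter
-- over the same range, and A's set holds exactly the labels ≠ -1 not yet seen.
lemma loop_inv (L : List Int) (k : Nat) (hk : k ≤ L.length)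
    (S0 : PySem.Set Int) (hS0 : ∀ x, x ∈ S0 ↔ x ∈ L ∧ x ≠ -1) :
    ((PySem.List.pyRange 0 (k : Int) 1).foldl
      (fun (st : PySem.Set Int × List Int) i =>
        let cluster_label := PySem.List.pyGetD L i 0
        let st1 := if st.1.contains cluster_label && cluster_label != -1
          then (((st.1.remove? cluster_label).getD st.1), st.2 ++ [i])
          else st
        if cluster_label == -1 then (st1.1, st1.2 ++ [i]) else st1)
      (S0, ([] : List Int))).2
      = (PySem.List.pyRange 0 (k : Int) 1).filter (fun i =>
          let l := PySem.List.pyGetD L i 0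
          l == -1 || !((PySem.List.slice L none (some i)).contains l))
    ∧ (∀ x, x ∈ ((PySem.List.pyRange 0 (k : Int) 1).foldl
      (fun (st : PySem.Set Int × List Int) i =>
        let cluster_label := PySem.List.pyGetD L i 0
        let st1 := if st.1.contains cluster_label && cluster_label != -1
          then (((st.1.remove? cluster_label).getD st.1), st.2 ++ [i])
          else st
        if cluster_label == -1 then (st1.1, st1.2 ++ [i]) else st1)
      (S0, ([] : List Int))).1 ↔ x ∈ L ∧ x ≠ -1 ∧ x ∉ L.take k) := by
  induction k with
  | zero =>
      simp [PySem.List.pyRange_one_eq_nil (by omega : (0:Int) ≤ 0), hS0]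
  | succ k ih =>
      have hk' : k ≤ L.length := by omega
      have hklt : k < L.length := by omega
      obtain ⟨ihAcc, ihSet⟩ := ih hk'
      have hsplit : PySem.List.pyRange 0 ((k + 1 : Nat) : Int) 1
          = PySem.List.pyRange 0 (k : Int) 1 ++ [(k : Int)] := by
        push_cast
        exact PySem.List.pyRange_one_succ_right (by positivity)
      rw [hsplit, List.foldl_append, List.filter_append]
      set r := ((PySem.List.pyRange 0 (k : Int) 1).foldl
        (fun (st : PySem.Set Int × List Int) i =>
          let cluster_label := PySem.List.pyGetD L i 0
          let st1 := if st.1.contains cluster_label && cluster_label != -1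
            then (((st.1.remove? cluster_label).getD st.1), st.2 ++ [i])
            else st
          if cluster_label == -1 then (st1.1, st1.2 ++ [i]) else st1)
        (S0, ([] : List Int))) with hr
      have hget : PySem.List.pyGetD L ((k : Nat) : Int) 0 = L[k] := by
        simp [hklt]
      have hget' : (L[k]?).getD 0 = L[k] := by
        simp [List.getElem?_eq_getElem hklt]
      have hslice : PySem.List.slice L none (some ((k : Nat) : Int)) = L.take k :=
        PySem.List.slice_to_natCast L k
      by_cases hneg : L[k] = -1
      · -- noise point: appended by both, set untouched
        have hguard : (r.1.contains L[k] && L[k] != -1) = false := by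
          simp [hneg]
        constructor
        · simp only [List.foldl_cons, List.foldl_nil, hget, hneg]
          simp [List.filter, hslice, ihAcc, hget', hneg]
        · intro x
          simp only [List.foldl_cons, List.foldl_nil, hget]
          rw [if_neg (show ¬ ((r.1.contains L[k] && L[k] != -1) = true) by rw [hguard]; exact Bool.false_ne_true),
              if_pos (show (L[k] == -1) = true by simp [hneg])]
          simp only [ihSet]
          rw [mem_take_succ L k hklt x]
          constructor
          · rintro ⟨h1, h2, h3⟩; exact ⟨h1, h2, by rintro (h | h); exact h3 h; exact h2 (h.trans hneg)⟩
          · rintro ⟨h1, h2, h3⟩; exact ⟨h1, h2, fun h => h3 (Or.inl h)⟩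
      · by_cases hseen : L[k] ∈ L.take k
        · -- label already chosen: dropped by both, set untouched
          have hmem : L[k] ∉ r.1 := by rw [ihSet]; tauto
          have hguard : (r.1.contains L[k] && L[k] != -1) = false := by
            simp [hmem]
          constructor
          · simp only [List.foldl_cons, List.foldl_nil, hget, hguard]
            simp [List.filter, hslice, ihAcc, hget', hneg, hseen]
            simp [show (L[k] == -1) = false by simp [hneg]]
          · intro x
            simp only [List.foldl_cons, List.foldl_nil, hget, hguard]
            simp only [Bool.false_eq_true, if_false]
            rw [if_neg (show ¬ ((L[k] == -1) = true) by simp [hneg])]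
            rw [ihSet x, mem_take_succ L k hklt x]
            constructor
            · rintro ⟨h1, h2, h3⟩
              exact ⟨h1, h2, by rintro (h | h); exact h3 h; exact h3 (h ▸ hseen)⟩
            · rintro ⟨h1, h2, h3⟩; exact ⟨h1, h2, fun h => h3 (Or.inl h)⟩
        · -- first occurrence: appended by both, label removed from the set
          have hmem : L[k] ∈ r.1 := by
            rw [ihSet]; exact ⟨List.getElem_mem hklt, hneg, hseen⟩
          have hguard : (r.1.contains L[k] && L[k] != -1) = true := by
            simp [hmem, hneg]
          have hrem : (r.1.remove? L[k]).getD r.1 = r.1.discard L[k] := by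
            simp [PySem.Set.remove?, hmem]
          constructor
          · simp only [List.foldl_cons, List.foldl_nil, hget, hguard]
            simp [List.filter, hslice, ihAcc, hget', hneg, hseen]
          · intro x
            simp only [List.foldl_cons, List.foldl_nil, hget, hguard]
            simp only [if_true]
            rw [if_neg (show ¬ ((L[k] == -1) = true) by simp [hneg])]
            simp only [hrem, PySem.Set.mem_discard]
            rw [ihSet x, mem_take_succ L k hklt x]
            tauto

-- find? over an increasing integer range returns the least index satisfying p
lemma find?_pyRange_aux (p : Int → Bool) (m : Nat) :
    ∀ (a b i : Int), b - a ≤ m →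
      ((PySem.List.pyRange a b 1).find? p = some i ↔
        (a ≤ i ∧ i < b ∧ p i = true ∧ ∀ j, a ≤ j → j < i → p j = false)) := by
  induction m with
  | zero =>
      intro a b i h
      rw [PySem.List.pyRange_one_eq_nil (by omega)]
      simp only [List.find?_nil]
      constructor
      · intro hc; exact absurd hc (by simp)
      · rintro ⟨h1, h2, _, _⟩; omega
  | succ m ih =>
      intro a b i h
      by_cases hab : b ≤ a
      · rw [PySem.List.pyRange_one_eq_nil hab]
        simp only [List.find?_nil]
        constructor
        · intro hc; exact absurd hc (by simp)
        · rintro ⟨h1, h2, _, _⟩; omega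
      · rw [not_le] at hab
        rw [PySem.List.pyRange_one_cons hab, List.find?_cons]
        by_cases hpa : p a = true
        · simp only [hpa]
          constructor
          · rintro h'
            have : a = i := by simpa using h'
            subst this
            exact ⟨le_refl _, hab, hpa, fun j h1 h2 => absurd h2 (by omega)⟩
          · rintro ⟨h1, h2, h3, h4⟩
            by_contra hne
            have hlt : a < i := lt_of_le_of_ne h1 (by intro he; exact hne (by rw [he]))
            have := h4 a (le_refl _) hlt
            rw [this] at hpa; exact Bool.false_ne_true hpa
        · have hpa' : p a = false := by
            cases hp : p a
            · rfl
            · exact absurd hp hpa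
          simp only [hpa']
          rw [ih (a + 1) b i (by omega)]
          constructor
          · rintro ⟨h1, h2, h3, h4⟩
            refine ⟨by omega, h2, h3, fun j hj1 hj2 => ?_⟩
            by_cases hja : j = a
            · rw [hja]; exact hpa'
            · exact h4 j (by omega) hj2
          · rintro ⟨h1, h2, h3, h4⟩
            have hia : i ≠ a := by intro he; rw [he] at h3; rw [h3] at hpa'; cases hpa'
            exact ⟨by omega, h2, h3, fun j hj1 hj2 => h4 j (by omega) hj2⟩

lemma find?_pyRange (p : Int → Bool) (a b i : Int) :
    (PySem.List.pyRange a b 1).find? p = some i ↔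
      (a ≤ i ∧ i < b ∧ p i = true ∧ ∀ j, a ≤ j → j < i → p j = false) :=
  find?_pyRange_aux p (b - a).toNat a b i (by omega)

-- membership in B's cluster_first_indices, characterised over the input
lemma firsts_mem (L : List Int) (n : Nat) (hlen : n ≤ L.length) (i : Int) :
    (∃ lab, lab ∈ ((PySem.Set.ofList L).discard (-1)) ∧
       (PySem.List.pyRange 0 (n : Int) 1).find?
         (fun j => PySem.List.pyGetD L j 0 == lab) = some i)
      ↔ (0 ≤ i ∧ i < (n : Int) ∧ PySem.List.pyGetD L i 0 ≠ -1
          ∧ PySem.List.pyGetD L i 0 ∉ L.take i.toNat) := by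
  constructor
  · rintro ⟨lab, hlab, hfind⟩
    rw [find?_pyRange] at hfind
    obtain ⟨h0, hi, hp, hforall⟩ := hfind
    have hlabeq : PySem.List.pyGetD L i 0 = lab := by simpa using hp
    have hlab2 := (PySem.Set.mem_discard (PySem.Set.ofList L) (-1) lab).1 hlab
    refine ⟨h0, hi, by rw [hlabeq]; exact hlab2.2, ?_⟩
    rw [hlabeq]
    intro hmem
    obtain ⟨j, hj, hLj⟩ := List.mem_take_iff_getElem.1 hmem
    have hji : (j : Int) < i := by omega
    have hjlen : j < L.length := by omega
    have := hforall (j : Int) (Int.natCast_nonneg j) hji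
    have hgj : PySem.List.pyGetD L ((j : Nat) : Int) 0 = L[j] := by simp [hjlen]
    rw [hgj, hLj] at this
    simp at this
  · rintro ⟨h0, hi, hne, hnin⟩
    have hilen : i.toNat < L.length := by omega
    have hgi : PySem.List.pyGetD L i 0 = L[i.toNat] :=
      PySem.List.pyGetD_eq_getElem L 0 h0 (by omega)
    refine ⟨PySem.List.pyGetD L i 0, ?_, ?_⟩
    · rw [PySem.Set.mem_discard, PySem.Set.mem_ofList]
      exact ⟨by rw [hgi]; exact List.getElem_mem hilen, hne⟩
    · rw [find?_pyRange]
      refine ⟨h0, hi, by simp, fun j hj1 hj2 => ?_⟩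
      have hjlen : j.toNat < L.length := by omega
      have hgj : PySem.List.pyGetD L j 0 = L[j.toNat] :=
        PySem.List.pyGetD_eq_getElem L 0 hj1 (by omega)
      simp only [hgj, beq_eq_false_iff_ne, ne_eq]
      intro heq
      apply hnin
      rw [← heq]
      exact List.mem_take_iff_getElem.2 ⟨j.toNat, by omega, rfl⟩

-- ===== VERDICT (by name: the statement is the Claim_ definition above) =====
theorem data_reduction_spec : Claim_equal_data_reduction := by
  intro images L _ hpre
  obtain ⟨hmem, hlen⟩ := hpre
  unfold Spec_data_reduction data_reduction data_reduction_alt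
  have hS0 : ((PySem.Set.ofList L).remove? (-1)).getD []
      = (PySem.Set.ofList L).discard (-1) := by
    simp [PySem.Set.remove?, hmem]
  rw [hS0]
  rw [(loop_inv L images.length hlen ((PySem.Set.ofList L).discard (-1))
    (fun x => by rw [PySem.Set.mem_discard, PySem.Set.mem_ofList])).1]
  -- names for B's three lists and A's characterised output
  set n := images.length with hn
  set R := PySem.List.pyRange 0 (n : Int) 1 with hR
  set q : Int → Bool := fun i => PySem.List.pyGetD L i 0 == -1 with hqdef
  set pred : Int → Bool := fun i =>
      PySem.List.pyGetD L i 0 == -1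
        || !((PySem.List.slice L none (some i)).contains (PySem.List.pyGetD L i 0)) with hpreddef
  set F := R.filter pred with hF
  set firsts := ((PySem.Set.ofList L).discard (-1)).filterMap
      (fun label => R.find? (fun i => PySem.List.pyGetD L i 0 == label)) with hfirsts
  -- the filter characterisation is strictly increasing
  have hpair : F.Pairwise (· < ·) :=
    List.Pairwise.filter pred (PySem.List.pairwise_lt_pyRange_one 0 (n : Int))
  -- noise part: filtering F by q gives exactly B's noise_indices
  have hnoise : F.filter q = R.filter q := by
    rw [hF, List.filter_filter]
    exact List.filter_congr (fun i _ => by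
      cases hq : q i
      · simp
      · simp only [Bool.true_and]
        have : PySem.List.pyGetD L i 0 == -1 := by simpa [hqdef] using hq
        simp [hpreddef, this])
  -- first-occurrence part: F minus the noise is a permutation of B's cluster_first_indices
  have hmemiff : ∀ i : Int, i ∈ F.filter (fun i => !q i) ↔ i ∈ firsts := by
    intro i
    have hchar : i ∈ firsts ↔ (0 ≤ i ∧ i < (n : Int) ∧ PySem.List.pyGetD L i 0 ≠ -1
        ∧ PySem.List.pyGetD L i 0 ∉ L.take i.toNat) := by
      rw [hfirsts, List.mem_filterMap]
      constructor
      · rintro ⟨a, ha1, ha2⟩; exact (firsts_mem L n hlen i).1 ⟨a, ha1, by rw [← hR]; exact ha2⟩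
      · intro h
        obtain ⟨a, ha1, ha2⟩ := (firsts_mem L n hlen i).2 h
        exact ⟨a, ha1, by rw [hR]; exact ha2⟩
    rw [hchar, List.mem_filter, hF, List.mem_filter, hR, PySem.List.mem_pyRange_one]
    constructor
    · rintro ⟨⟨⟨h0, hi⟩, hpredt⟩, hnq⟩
      have hne : PySem.List.pyGetD L i 0 ≠ -1 := by simpa [hqdef] using hnq
      refine ⟨h0, hi, hne, ?_⟩
      have hslice : PySem.List.slice L none (some i) = L.take i.toNat := by
        rw [show i = ((i.toNat : Nat) : Int) by omega]
        exact PySem.List.slice_to_natCast L i.toNat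
      rw [hpreddef] at hpredt
      simp only [Bool.or_eq_true, beq_iff_eq, Bool.not_eq_true'] at hpredt
      rcases hpredt with h | h
      · exact absurd h hne
      · rw [hslice] at h; simpa using h
    · rintro ⟨h0, hi, hne, hnin⟩
      have hslice : PySem.List.slice L none (some i) = L.take i.toNat := by
        rw [show i = ((i.toNat : Nat) : Int) by omega]
        exact PySem.List.slice_to_natCast L i.toNat
      refine ⟨⟨⟨h0, hi⟩, ?_⟩, ?_⟩
      · rw [hpreddef]
        simp only [Bool.or_eq_true, Bool.not_eq_true']
        right
        rw [hslice]; simpa using hnin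
      · simp [hqdef, hne]
  have hnodupF : F.Nodup := List.Nodup.filter pred (PySem.List.nodup_pyRange_one 0 (n : Int))
  have hnodup1 : (F.filter (fun i => !q i)).Nodup := List.Nodup.filter _ hnodupF
  have hnodup2 : firsts.Nodup := by
    rw [hfirsts]
    refine List.Nodup.filterMap ?_ (PySem.Set.nodup_discard (PySem.Set.ofList L) (-1) (PySem.Set.nodup_ofList L))
    intro a a' b hb hb'
    have h1 := List.find?_some hb
    have h2 := List.find?_some hb'
    simp only [beq_iff_eq] at h1 h2
    rw [← h1, ← h2]
  have hothers : (F.filter (fun i => !q i)).Perm firsts :=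
    (List.perm_ext_iff_of_nodup hnodup1 hnodup2).2 hmemiff
  have hperm : F.Perm (R.filter q ++ firsts) := by
    refine ((List.filter_append_perm q F).symm).trans ?_
    rw [hnoise]
    exact List.Perm.append_left (R.filter q) hothers
  exact (PySem.List.sorted_eq_of_perm_of_pairwise_lt
    (R.filter q ++ firsts) F (fun x => x) hperm hpair).symm
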